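-- pv_equiv track=rewrite | github.com/deivid-111/Air-Canada-Flight-Assistant-v2 | utilities.py | group_flights_by_date
-- ===== SOURCE A (Python) =====
-- def group_flights_by_date(flights: dict) -> dict:
--     """Group flight entries by dep_date string (DDMMYYYY)."""
--     grouped = {}
--     for code, entry in flights.items():
--         date_raw = entry.get("dep_date", "unknown")
--         if date_raw not in grouped:
--             grouped[date_raw] = []
--         grouped[date_raw].append((code, entry))
--     # Sort each day's list by dep_time
--     for date_raw in grouped:
--         grouped[date_raw].sort(key=lambda x: x[1].get("dep_time", "00:00"))
--     return grouped
-- ===== SOURCE B (Python) =====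
-- def group_flights_by_date(flights: dict) -> dict:
--     """Group flight entries by dep_date string (DDMMYYYY)."""
--     # Seed the groups in first-occurrence date order, then do ONE global
--     # stable sort by dep_time and distribute in a single pass.
--     grouped = {entry.get("dep_date", "unknown"): [] for entry in flights.values()}
--     for code, entry in sorted(flights.items(), key=lambda x: x[1].get("dep_time", "00:00")):
--         grouped[entry.get("dep_date", "unknown")].append((code, entry))
--     return grouped
-- ===== Notes on version B (the rewrite author's own statement) =====
-- stated objective: alternative
-- what changed: Replaces group-then-sort-each-group with seed-keys, one global stable sort by dep_time, then a single distributing pass (stability makes per-group order identical).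
import Mathlib
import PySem

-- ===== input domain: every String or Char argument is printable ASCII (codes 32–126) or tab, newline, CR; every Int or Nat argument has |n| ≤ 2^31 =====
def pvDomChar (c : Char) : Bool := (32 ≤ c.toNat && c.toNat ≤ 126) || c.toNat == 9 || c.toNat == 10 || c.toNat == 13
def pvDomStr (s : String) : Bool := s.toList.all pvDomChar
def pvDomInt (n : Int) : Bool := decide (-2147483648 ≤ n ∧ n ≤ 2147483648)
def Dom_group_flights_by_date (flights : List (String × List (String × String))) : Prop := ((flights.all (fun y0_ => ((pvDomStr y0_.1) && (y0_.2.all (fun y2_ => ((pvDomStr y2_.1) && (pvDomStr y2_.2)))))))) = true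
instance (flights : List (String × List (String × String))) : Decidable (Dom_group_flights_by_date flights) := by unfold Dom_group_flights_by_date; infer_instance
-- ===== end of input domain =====

-- B replaces A's group-then-sort-each-group with seed-keys + ONE global stable sort by dep_time + a single distributing pass (alternative decomposition, same cost).

-- entry.get("dep_date", "unknown") / x[1].get("dep_time", "00:00") (shared by both ports)
def pvDate (ce : String × List (String × String)) : String :=
  PySem.Dict.getD (PySem.Dict.mk ce.2) "dep_date" "unknown"
def pvTime (ce : String × List (String × String)) : String :=
  PySem.Dict.getD (PySem.Dict.mk ce.2) "dep_time" "00:00"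

-- ===== PORT A =====
def group_flights_by_date (flights : List (String × List (String × String))) : List (String × List (String × (List (String × String)))) :=
  -- grouped = {}; for code, entry in flights.items(): …
  let grouped := flights.foldl (fun g ce =>
      let date_raw := pvDate ce
      let g' := if g.contains date_raw then g else g.insert date_raw []
      g'.modify date_raw [] (fun l => l ++ [ce]))
    PySem.Dict.empty
  -- for date_raw in grouped: grouped[date_raw].sort(key=…)  (in-place sort of each value)
  grouped.items.map (fun p => (p.1, PySem.List.sorted p.2 pvTime false))

-- ===== PORT B =====
def group_flights_by_date_alt (flights : List (String × List (String × String))) : List (String × List (String × (List (String × String)))) :=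
  -- grouped = {entry.get("dep_date","unknown"): [] for entry in flights.values()}
  let grouped := flights.foldl (fun g ce => g.insert (pvDate ce) []) PySem.Dict.empty
  -- for code, entry in sorted(flights.items(), key=…): grouped[…].append((code, entry))
  let byTime := PySem.List.sorted flights pvTime false
  (byTime.foldl (fun g ce => g.modify (pvDate ce) [] (fun l => l ++ [ce])) grouped).items

-- ===== PRECONDITION & SPEC =====
def Spec_group_flights_by_date (flights : List (String × List (String × String))) (out : List (String × List (String × (List (String × String))))) : Prop := out = group_flights_by_date_alt flights
instance (flights : List (String × List (String × String))) (out : List (String × List (String × (List (String × String))))) : Decidable (Spec_group_flights_by_date flights out) := by unfold Spec_group_flights_by_date; infer_instance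

-- ===== CLAIM (what is proved, stated in full; the proofs are below) =====
def Claim_equal_group_flights_by_date : Prop := ∀ (flights : List (String × List (String × String))), Dom_group_flights_by_date flights → Spec_group_flights_by_date flights (group_flights_by_date flights)

-- ===== LEMMAS AND PROOFS =====

-- x inserted in front when its key is strictly below every element's key
theorem pv_insertBy_front {α κ : Type} [LinearOrder κ] (key : α → κ) (x : α) (ys : List α)
    (h : ∀ y ∈ ys, key x < key y) :
    PySem.List.insertBy (fun a b => decide (key a < key b)) x ys = x :: ys := by
  cases ys with
  | nil => rfl
  | cons y ys => simp [PySem.List.insertBy, h y (List.mem_cons_self)]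

-- filter commutes with inserting into a key-sorted list
theorem pv_filter_insertBy {α κ : Type} [LinearOrder κ] (key : α → κ) (p : α → Bool) (x : α)
    (ys : List α) (hys : ys.Pairwise (fun a b => key a ≤ key b)) :
    (PySem.List.insertBy (fun a b => decide (key a < key b)) x ys).filter p =
      if p x then PySem.List.insertBy (fun a b => decide (key a < key b)) x (ys.filter p)
      else ys.filter p := by
  induction ys with
  | nil => by_cases hpx : p x <;> simp [PySem.List.insertBy, hpx]
  | cons y ys ih =>
    rcases List.pairwise_cons.mp hys with ⟨hy, htail⟩
    by_cases hb : key x < key y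
    · have hfront : PySem.List.insertBy (fun a b => decide (key a < key b)) x ((y :: ys).filter p) = x :: (y :: ys).filter p := by
        apply pv_insertBy_front
        intro z hz
        have hz' := List.mem_of_mem_filter hz
        rcases List.mem_cons.mp hz' with rfl | hzz
        · exact hb
        · exact lt_of_lt_of_le hb (hy z hzz)
      simp only [PySem.List.insertBy, hb, decide_true, if_true]
      rw [List.filter_cons, hfront]
    · simp only [PySem.List.insertBy, hb, decide_false, Bool.false_eq_true, if_false]
      by_cases hpy : p y
      · simp only [List.filter_cons, hpy, if_true]
        rw [ih htail]
        by_cases hpx : p x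
        · simp only [hpx, if_true]
          simp [PySem.List.insertBy, hb]
        · simp [hpx]
      · simp only [List.filter_cons, hpy]
        rw [ih htail]
        by_cases hpx : p x <;> simp [hpx]

theorem pv_sorted_append_singleton {α κ : Type} [LT κ] [DecidableLT κ] (key : α → κ) (xs : List α) (x : α) :
    PySem.List.sorted (xs ++ [x]) key false =
      PySem.List.insertBy (fun a b => decide (key a < key b)) x (PySem.List.sorted xs key false) := by
  rw [PySem.List.sorted_eq_foldl_insertBy, PySem.List.sorted_eq_foldl_insertBy, List.foldl_append]
  rfl

-- a stable sort commutes with filter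
theorem pv_filter_sorted {α κ : Type} [LinearOrder κ] (key : α → κ) (p : α → Bool) (xs : List α) :
    (PySem.List.sorted xs key false).filter p = PySem.List.sorted (xs.filter p) key false := by
  induction xs using List.reverseRecOn with
  | nil => rfl
  | append_singleton xs x ih =>
    rw [pv_sorted_append_singleton, pv_filter_insertBy key p x _ (PySem.List.sorted_pairwise xs key),
      ih, List.filter_append]
    by_cases hpx : p x
    · simp [hpx, pv_sorted_append_singleton]
    · simp [hpx]

-- named forms of the two loop bodies (used by the proofs)
def pvAStep (g : PySem.Dict String (List (String × List (String × String))))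
    (ce : String × List (String × String)) : PySem.Dict String (List (String × List (String × String))) :=
  let date_raw := pvDate ce
  let g' := if g.contains date_raw then g else g.insert date_raw []
  g'.modify date_raw [] (fun l => l ++ [ce])

def pvMStep (g : PySem.Dict String (List (String × List (String × String))))
    (ce : String × List (String × String)) : PySem.Dict String (List (String × List (String × String))) :=
  g.modify (pvDate ce) [] (fun l => l ++ [ce])

-- value of A's grouping step
theorem pv_getD_AStep (g : PySem.Dict String (List (String × List (String × String))))
    (ce : String × List (String × String)) (k : String) :
    (pvAStep g ce).getD k [] =
      if k = pvDate ce then g.getD (pvDate ce) [] ++ [ce] else g.getD k [] := by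
  unfold pvAStep
  by_cases hc : g.contains (pvDate ce)
  · simp only [hc, if_true, PySem.Dict.getD_modify]
  · simp only [hc, Bool.false_eq_true, if_false, PySem.Dict.getD_modify, PySem.Dict.getD_insert]
    have h0 : g.getD (pvDate ce) [] = [] :=
      PySem.Dict.getD_of_not_contains g [] (by simpa using hc)
    split_ifs with h <;> simp [h0]

theorem pv_keys_AStep (g : PySem.Dict String (List (String × List (String × String))))
    (ce : String × List (String × String)) :
    (pvAStep g ce).keys =
      if g.contains (pvDate ce) then g.keys else g.keys ++ [pvDate ce] := by
  unfold pvAStep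
  by_cases hc : g.contains (pvDate ce)
  · simp only [hc, if_true, PySem.Dict.keys_modify, PySem.Dict.keys_insert_of_contains _ _ hc]
  · have hc' : g.contains (pvDate ce) = false := by simpa using hc
    simp only [hc', Bool.false_eq_true, if_false, PySem.Dict.keys_modify]
    rw [PySem.Dict.keys_insert_of_contains _ _ (PySem.Dict.contains_insert_self g _ _),
      PySem.Dict.keys_insert_of_not_contains g _ hc']

-- characterisation of A's grouping fold
theorem pv_A1_char (xs : List (String × List (String × String))) :
    (xs.foldl pvAStep PySem.Dict.empty).keys = PySem.List.dedup (xs.map pvDate) ∧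
      ∀ k, (xs.foldl pvAStep PySem.Dict.empty).getD k [] =
        xs.filter (fun ce => pvDate ce == k) := by
  induction xs using List.reverseRecOn with
  | nil => constructor <;> simp [PySem.Dict.keys_empty, PySem.Dict.getD_empty, PySem.List.dedup]
  | append_singleton xs c ih =>
    rcases ih with ⟨hkeys, hvals⟩
    rw [List.foldl_append]
    simp only [List.foldl_cons, List.foldl_nil]
    have hcont : (xs.foldl pvAStep PySem.Dict.empty).contains (pvDate c) =
        decide (pvDate c ∈ PySem.List.dedup (xs.map pvDate)) := by
      rw [PySem.Dict.contains_eq_decide_mem_keys, hkeys]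
    constructor
    · rw [pv_keys_AStep, hcont, hkeys]
      simp only [List.map_append, List.map_cons, List.map_nil, PySem.List.dedup,
        PySem.Set.ofList, List.foldl_append, List.foldl_cons, List.foldl_nil]
      by_cases hm : pvDate c ∈ PySem.Set.ofList (xs.map pvDate)
      · simp [PySem.Set.add]
      · have : (PySem.Set.ofList (xs.map pvDate)).contains (pvDate c) = false := by
          simpa using fun h => hm (List.contains_iff_mem.mp h)
        simp [PySem.Set.add]
    · intro k
      rw [pv_getD_AStep, List.filter_append]
      by_cases hk : k = pvDate c
      · subst hk
        simp [hvals]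
      · have : (pvDate c == k) = false := by simpa using Ne.symm hk
        simp [hk, hvals, this]

-- B's seeding fold: every value is []
theorem pv_seed_getD (xs : List (String × List (String × String))) (k : String) :
    (xs.foldl (fun g ce => g.insert (pvDate ce) []) PySem.Dict.empty).getD k
      ([] : List (String × List (String × String))) = [] := by
  induction xs using List.reverseRecOn with
  | nil => simp [PySem.Dict.getD_empty]
  | append_singleton xs c ih =>
    rw [List.foldl_append]
    simp only [List.foldl_cons, List.foldl_nil, PySem.Dict.getD_insert]
    split_ifs <;> simp [ih]

-- B's distributing fold: values accumulate the filtered stream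
theorem pv_F_getD (zs : List (String × List (String × String)))
    (g : PySem.Dict String (List (String × List (String × String)))) (k : String) :
    (zs.foldl pvMStep g).getD k [] = g.getD k [] ++ zs.filter (fun ce => pvDate ce == k) := by
  induction zs using List.reverseRecOn with
  | nil => simp
  | append_singleton zs c ih =>
    rw [List.foldl_append]
    simp only [List.foldl_cons, List.foldl_nil]
    simp only [pvMStep, PySem.Dict.getD_modify, List.filter_append,
      List.filter_cons, List.filter_nil]
    by_cases hk : k = pvDate c
    · subst hk; simp [ih]
    · have : (pvDate c == k) = false := by simpa using Ne.symm hk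
      simp [hk, ih, this]

-- Set.update with only already-present elements is the identity
theorem pv_update_self (s : PySem.Set String) (l : List String) (h : ∀ x ∈ l, x ∈ s) :
    PySem.Set.update s l = s := by
  induction l generalizing s with
  | nil => rfl
  | cons a l ih =>
    have ha : a ∈ s := h a List.mem_cons_self
    show List.foldl PySem.Set.add (PySem.Set.add s a) l = s
    rw [show PySem.Set.add s a = s by simp [PySem.Set.add, ha]]
    exact ih s (fun x hx => h x (List.mem_cons_of_mem a hx))

-- ===== VERDICT (by name: the statement is the Claim_ definition above) =====
theorem group_flights_by_date_spec : Claim_equal_group_flights_by_date := by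
  intro flights _
  unfold Spec_group_flights_by_date
  have hA : group_flights_by_date flights =
      (List.foldl pvAStep PySem.Dict.empty flights).items.map
        (fun p => (p.1, PySem.List.sorted p.2 pvTime false)) := rfl
  have hB : group_flights_by_date_alt flights =
      (List.foldl pvMStep
        (List.foldl (fun g ce => g.insert (pvDate ce) []) PySem.Dict.empty flights)
        (PySem.List.sorted flights pvTime false)).items := rfl
  rw [hA, hB]
  rcases pv_A1_char flights with ⟨hAkeys, hAvals⟩
  have hAnodup : (flights.foldl pvAStep PySem.Dict.empty).keys.Nodup := by
    rw [hAkeys]; exact PySem.Set.nodup_ofList _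
  -- B's seeded dict
  set seed := flights.foldl (fun g ce => g.insert (pvDate ce) ([] : List (String × List (String × String)))) PySem.Dict.empty with hseed
  have hseedkeys : seed.keys = PySem.List.dedup (flights.map pvDate) := by
    rw [hseed]
    exact PySem.Dict.keys_foldl_insert_key flights pvDate (fun _ _ => []) PySem.Dict.empty
  -- B's final dict
  set BD := (PySem.List.sorted flights pvTime false).foldl pvMStep seed with hBD
  have hBkeys : BD.keys = PySem.List.dedup (flights.map pvDate) := by
    have hk2 : (List.foldl pvMStep seed (PySem.List.sorted flights pvTime false)).keys =
        PySem.Set.update seed.keys ((PySem.List.sorted flights pvTime false).map pvDate) :=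
      PySem.Dict.keys_foldl_modify_key (PySem.List.sorted flights pvTime false) pvDate
        ([] : List (String × List (String × String))) (fun _ ce l => l ++ [ce]) seed
    rw [hBD, hk2, hseedkeys]
    apply pv_update_self
    intro x hx
    rcases List.mem_map.mp hx with ⟨ce, hce, rfl⟩
    have : ce ∈ flights := (PySem.List.mem_sorted flights pvTime false ce).mp hce
    simp only [PySem.List.dedup, PySem.Set.mem_ofList]
    exact List.mem_map.mpr ⟨ce, this, rfl⟩
  have hBnodup : BD.keys.Nodup := by rw [hBkeys]; exact PySem.Set.nodup_ofList _
  -- items of both sides as maps over the same key list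
  rw [PySem.Dict.items_eq_map_keys _ hAnodup ([] : List (String × List (String × String))),
    PySem.Dict.items_eq_map_keys _ hBnodup ([] : List (String × List (String × String)))]
  rw [hAkeys, hBkeys, List.map_map]
  apply List.map_congr_left
  intro k _
  simp only [Function.comp]
  rw [hAvals k, hBD, pv_F_getD, hseed, pv_seed_getD, List.nil_append]
  rw [pv_filter_sorted pvTime (fun ce => pvDate ce == k) flights]
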